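-- pv_equiv track=rewrite | github.com/filippovisconti/AdventOfCode2022 | Day1/day1b.py | isBiggerThanAny
-- ===== SOURCE A (Python) =====
-- def isBiggerThanAny(l: list[int], x: int) -> list[int]:
--     l.sort(reverse=True)
--     res = []
--     for i, val in enumerate(l):
--         if val < x:
--             return res + [x] + l[i:-1]
--         else:
--             res.append(val)
--     return res
-- ===== SOURCE B (Python) =====
-- def isBiggerThanAny(l: list[int], x: int) -> list[int]:
--     l.sort(reverse=True)
--     return sorted(l + [x], reverse=True)[:len(l)]
-- ===== Notes on version B (the rewrite author's own statement) =====
-- stated objective: simpler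
-- what changed: Replaces A's indexed scan for the insertion point (with its res accumulator, splice of [x] and slice l[i:-1]) by sorting the augmented list l+[x] descending as a whole and returning its first len(l) elements; the in-place l.sort(reverse=True) is kept so the argument mutation is identical.
import Mathlib
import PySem

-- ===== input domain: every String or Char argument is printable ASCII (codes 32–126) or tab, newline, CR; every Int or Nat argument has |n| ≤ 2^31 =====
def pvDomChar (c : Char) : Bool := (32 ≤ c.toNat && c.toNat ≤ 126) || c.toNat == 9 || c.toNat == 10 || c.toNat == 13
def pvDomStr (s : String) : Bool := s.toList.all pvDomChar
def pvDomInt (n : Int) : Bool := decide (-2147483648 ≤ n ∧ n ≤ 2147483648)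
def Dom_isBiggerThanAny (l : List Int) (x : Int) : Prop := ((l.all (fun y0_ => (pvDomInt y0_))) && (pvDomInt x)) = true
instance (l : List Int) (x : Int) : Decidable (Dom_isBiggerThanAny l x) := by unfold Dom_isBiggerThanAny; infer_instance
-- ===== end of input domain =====

-- B replaces A's indexed insertion-point scan by re-sorting the augmented list l+[x]
-- descending and taking its first len(l) elements (simpler decomposition, same cost);
-- both versions sort the argument list in place (equivalence proved about the return value).


-- ===== PORT A =====
-- the 'for i, val in enumerate(l)' loop: res is the accumulator, i the running index,
-- 'return res + [x] + l[i:-1]' becomes the slice on the sorted list ls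
def isBiggerThanAnyGo (ls : List Int) (x : Int) : List Int → Nat → List Int → List Int
  | [], _, res => res
  | val :: rest, i, res =>
      if val < x then res ++ [x] ++ PySem.List.slice ls (some (i : Int)) (some (-1))
      else isBiggerThanAnyGo ls x rest (i + 1) (res ++ [val])

def isBiggerThanAny (l : List Int) (x : Int) : List Int :=
  let ls := PySem.List.sorted l (fun v => v) true    -- l.sort(reverse=True)
  isBiggerThanAnyGo ls x ls 0 []

-- ===== PORT B =====
def isBiggerThanAny_alt (l : List Int) (x : Int) : List Int :=
  -- l.sort(reverse=True) makes l the descending-sorted list; then sorted(l + [x], reverse=True)[:len(l)]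
  PySem.List.slice
    (PySem.List.sorted (PySem.List.sorted l (fun v => v) true ++ [x]) (fun v => v) true)
    none (some (PySem.List.len l))

-- ===== PRECONDITION & SPEC =====
def Spec_isBiggerThanAny (l : List Int) (x : Int) (out : List Int) : Prop := out = isBiggerThanAny_alt l x
instance (l : List Int) (x : Int) (out : List Int) : Decidable (Spec_isBiggerThanAny l x out) := by unfold Spec_isBiggerThanAny; infer_instance

-- ===== CLAIM (what is proved, stated in full; the proofs are below) =====
def Claim_equal_isBiggerThanAny : Prop := ∀ (l : List Int) (x : Int), Dom_isBiggerThanAny l x → Spec_isBiggerThanAny l x (isBiggerThanAny l x)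

-- ===== LEMMAS AND PROOFS =====

-- l[i:-1] with a natural start index is drop-then-dropLast
theorem slice_natCast_neg_one (xs : List Int) (a : Nat) :
    PySem.List.slice xs (some (a : Int)) (some (-1)) = (xs.dropLast).drop a := by
  simp only [PySem.List.slice, PySem.List.clampIdx]
  rcases eq_or_ne xs [] with h | h
  · subst h; simp
  · have ha0 : ¬ ((a : Int) < 0) := by omega
    have hl : 0 < xs.length := by
      rcases xs with _ | ⟨y, ys⟩
      · exact absurd rfl h
      · simp
    simp only [if_neg ha0, Int.toNat_natCast,
      if_pos (show ((-1 : Int) < 0) by decide),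
      if_neg (show ¬ ((xs.length : Int) + -1 < 0) by omega)]
    by_cases ha : a ≤ xs.length
    · rw [min_eq_left ha, List.dropLast_eq_take, List.drop_take]
      congr 1
      omega
    · rw [min_eq_right (by omega), List.drop_length, List.take_nil,
        List.drop_eq_nil_of_le (by simp [List.length_dropLast]; omega)]

-- dropping the scanned prefix from the truncated whole list leaves the truncated suffix
theorem drop_length_dropLast_append (pre suf : List Int) :
    ((pre ++ suf).dropLast).drop pre.length = suf.dropLast := by
  cases suf with
  | nil => simp [List.drop_eq_nil_of_le, List.length_dropLast]
  | cons v rest =>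
      rw [List.dropLast_append_of_ne_nil _, List.drop_append_of_le_length (by simp),
        List.drop_length, List.nil_append]
      simp

-- the loop invariant: scanning suffix suf with accumulated prefix pre computes
-- the first (length) elements of insertBy's insertion of x
theorem go_invariant (x : Int) (pre suf : List Int) :
    isBiggerThanAnyGo (pre ++ suf) x suf pre.length pre =
      (pre ++ PySem.List.insertBy (fun a b => decide (b < a)) x suf).take (pre.length + suf.length) := by
  induction suf generalizing pre with
  | nil =>
      simp [isBiggerThanAnyGo, PySem.List.insertBy]
  | cons v rest ih =>
      by_cases hv : v < x
      · simp only [isBiggerThanAnyGo, PySem.List.insertBy, decide_eq_true_eq, hv, if_pos]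
        rw [slice_natCast_neg_one, drop_length_dropLast_append]
        have : pre.length + (v :: rest).length = pre.length + (rest.length + 1) := by simp
        rw [this, List.take_append, List.dropLast_eq_take]
        simp
      · have h1 := ih (pre ++ [v])
        simp only [isBiggerThanAnyGo, PySem.List.insertBy, decide_eq_true_eq, hv,
          List.append_assoc, List.singleton_append, List.length_append,
          List.length_singleton] at h1 ⊢
        rw [h1]
        simp only [if_false, List.length_cons]
        congr 1
        omega

theorem main_eq (l : List Int) (x : Int) : isBiggerThanAny l x = isBiggerThanAny_alt l x := by
  unfold isBiggerThanAny isBiggerThanAny_alt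
  have hgo := go_invariant x [] (PySem.List.sorted l (fun v => v) true)
  simp only [List.nil_append, List.length_nil, Nat.zero_add] at hgo
  rw [hgo]
  rw [PySem.List.sorted_rev_eq_foldl_insertBy (PySem.List.sorted l (fun v => v) true ++ [x]),
    List.foldl_append, ← PySem.List.sorted_rev_eq_foldl_insertBy,
    PySem.List.sorted_rev_sorted_rev]
  simp only [List.foldl_cons, List.foldl_nil, PySem.List.len_eq, PySem.List.slice_to_natCast]
  rw [PySem.List.length_sorted]

-- ===== VERDICT (by name: the statement is the Claim_ definition above) =====
theorem isBiggerThanAny_spec : Claim_equal_isBiggerThanAny := by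
  intro l x _
  exact main_eq l x
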